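-- pv_equiv track=rewrite | github.com/ESgarbi/bert-fda-nutrition-ner | src/iob_training_data_generator.py | _generate_iob
-- ===== SOURCE A (Python) =====
-- def _generate_iob(raw_string):
--     if '<>' in raw_string:
--         return None, None
--     weights = {
--         "O": "0",
--         "B-ACIDITYREGULATORS": 1,
--         "I-ACIDITYREGULATORS": 2,
--         "B-ACIDS": 3,
--         "I-ACIDS": 4,
--         "B-ADDITIVES": 5,
--         "I-ADDITIVES": 6,
--         "B-ALCOHOLS": 7,
--         "I-ALCOHOLS": 8,
--         "B-AMINOACIDS": 9,
--         "I-AMINOACIDS": 10,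
--         "B-CARBOHYDRATES": 11,
--         "I-CARBOHYDRATES": 12,
--         "B-CAROTENOIDS": 13,
--         "I-CAROTENOIDS": 14,
--         "B-COLORANTS": 15,
--         "I-COLORANTS": 16,
--         "B-FIBER": 17,
--         "I-FIBER": 18,
--         "B-FLAVONOIDS": 19,
--         "I-FLAVONOIDS": 20,
--         "B-FLAVORINGS": 21,
--         "I-FLAVORINGS": 22,
--         "B-LIPIDS": 23,
--         "I-LIPIDS": 24,
--         "B-MACRONUTRIENTS": 25,
--         "I-MACRONUTRIENTS": 26,
--         "B-MINERALS": 27,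
--         "I-MINERALS": 28,
--         "B-ORGANICCOMPOUNDS": 29,
--         "I-ORGANICCOMPOUNDS": 30,
--         "B-PHYTOCHEMICALS": 31,
--         "I-PHYTOCHEMICALS": 32,
--         "B-PRESERVATIVES": 33,
--         "I-PRESERVATIVES": 34,
--         "B-PROTEINS": 35,
--         "I-PROTEINS": 36,
--         "B-PROXIMATES": 37,
--         "I-PROXIMATES": 38,
--         "B-STABILIZERS": 39,
--         "I-STABILIZERS": 40,
--         "B-STIMULANTS": 41,
--         "I-STIMULANTS": 42,
--         "B-SUGARS": 43,
--         "I-SUGARS": 44,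
--         "B-VITAMINS": 45,
--         "I-VITAMINS": 46,
--         "B-WATER": 47,
--         "I-WATER": 48
--         }
--     for weight in weights:
--         weights[weight] = 0
--
--
--     words = raw_string.split()
--     iob = []
--     current_tag = []
--     for word in words:
--         # trim word
--         word = word.strip()
--         if  word.startswith("</") and word.endswith(">"):
--             current_tag = []
--         elif word.startswith("<") and word.endswith(">"):
--             current_tag.append(word[1:-1])
--         else:
--             if len(current_tag) == 0:
--                 iob.append((word, "O"))
--             else:
--                 if len(current_tag) == 1:
--                     label_ = f"B-{current_tag[0]}".upper()
--                     if label_ not in weights: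
--                         weights[label_] = 1
--                     else:
--                         weights[label_] += 1
--                     # check if current_tag[0] is in self.label2id
--
--                     # if label_ not in self.label2id:
--                     #     label_ = "O"
--                     iob.append((word, label_))
--                     #if current_tag[0] == label:
--
--                     current_tag.append(current_tag[0])
--                 else:
--
--                     label_ = f"I-{current_tag[0]}".upper()
--                     if label_ not in weights:
--                         weights[label_] = 1
--                     else:
--                         weights[label_] += 1
--                     iob.append((word, label_))
--
--     return iob, weights
-- ===== SOURCE B (Python) =====
-- _BASE_LABELS = [
--     "O",
--     "B-ACIDITYREGULATORS", "I-ACIDITYREGULATORS",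
--     "B-ACIDS", "I-ACIDS",
--     "B-ADDITIVES", "I-ADDITIVES",
--     "B-ALCOHOLS", "I-ALCOHOLS",
--     "B-AMINOACIDS", "I-AMINOACIDS",
--     "B-CARBOHYDRATES", "I-CARBOHYDRATES",
--     "B-CAROTENOIDS", "I-CAROTENOIDS",
--     "B-COLORANTS", "I-COLORANTS",
--     "B-FIBER", "I-FIBER",
--     "B-FLAVONOIDS", "I-FLAVONOIDS",
--     "B-FLAVORINGS", "I-FLAVORINGS",
--     "B-LIPIDS", "I-LIPIDS",
--     "B-MACRONUTRIENTS", "I-MACRONUTRIENTS",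
--     "B-MINERALS", "I-MINERALS",
--     "B-ORGANICCOMPOUNDS", "I-ORGANICCOMPOUNDS",
--     "B-PHYTOCHEMICALS", "I-PHYTOCHEMICALS",
--     "B-PRESERVATIVES", "I-PRESERVATIVES",
--     "B-PROTEINS", "I-PROTEINS",
--     "B-PROXIMATES", "I-PROXIMATES",
--     "B-STABILIZERS", "I-STABILIZERS",
--     "B-STIMULANTS", "I-STIMULANTS",
--     "B-SUGARS", "I-SUGARS",
--     "B-VITAMINS", "I-VITAMINS",
--     "B-WATER", "I-WATER",
-- ]
--
--
-- def _generate_iob(raw_string):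
--     if '<>' in raw_string:
--         return None, None
--
--     # Pass 1: segmentation only. A closing tag ends the current region; keep
--     # the stripped words (opening tags and plain words) of each region.
--     segments, cur = [], []
--     for w in raw_string.split():
--         w = w.strip()
--         if w.startswith("</") and w.endswith(">"):
--             segments.append(cur)
--             cur = []
--         else:
--             cur.append(w)
--     segments.append(cur)
--
--     # Pass 2: label each segment independently. Within one segment a word's
--     # label depends only on the first tag opened, the number of open tags, and
--     # whether a word was already labelled in it (the B-/I- switch).
--     iob = []
--     for seg in segments:
--         opens, first, worded = 0, "", False
--         for w in seg:
--             if w.startswith("<") and w.endswith(">"):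
--                 if opens == 0:
--                     first = w[1:-1]
--                 opens += 1
--             elif opens == 0:
--                 iob.append((w, "O"))
--             else:
--                 prefix = "B-" if opens == 1 and not worded else "I-"
--                 iob.append((w, (prefix + first).upper()))
--                 worded = True
--
--     # Pass 3: count labels over the finished token list.
--     weights = {k: 0 for k in _BASE_LABELS}
--     for _, label in iob:
--         if label != "O":
--             weights[label] = weights.get(label, 0) + 1
--     return iob, weights
-- ===== Notes on version B (the rewrite author's own statement) =====
-- stated objective: alternative
-- what changed: Replaces A's single interleaved parse-and-count loop with a growing tag-list state by a three-stage pipeline: cut the word stream into segments at closing tags, label each segment independently with a scalar (open-count, first-tag, B/I-switch) state, then count labels in a separate pass over the finished token list.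
import Mathlib
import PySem

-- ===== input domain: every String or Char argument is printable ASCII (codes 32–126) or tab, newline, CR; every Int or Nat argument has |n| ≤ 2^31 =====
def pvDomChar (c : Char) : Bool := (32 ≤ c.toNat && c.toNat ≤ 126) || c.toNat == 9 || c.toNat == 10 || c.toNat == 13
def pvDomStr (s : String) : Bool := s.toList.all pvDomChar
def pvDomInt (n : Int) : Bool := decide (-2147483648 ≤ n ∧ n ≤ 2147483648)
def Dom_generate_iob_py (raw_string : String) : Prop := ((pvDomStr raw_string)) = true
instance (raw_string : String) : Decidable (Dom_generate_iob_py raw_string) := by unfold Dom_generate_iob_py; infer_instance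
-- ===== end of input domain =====

-- B replaces A's interleaved parse-and-count loop (growing tag-list state, weights bumped inside the
-- loop) by a three-stage pipeline: segmentation at closing tags, per-segment labelling with a scalar
-- (open-count, first-tag, B/I-switch) state, then a separate counting pass; same return value
-- (objective: alternative).

-- ===== PORT A =====
-- base vocabulary keys, shared literal (Python writes the dict literal; its values are all overwritten to 0
-- by the 'for weight in weights' loop before any use, so the literal's values — incl. the string "0" at "O",
-- which never survives as a value of the declared Int type — are initialised as 0 here)
def pyBaseLabels : List String :=
  ["O",
   "B-ACIDITYREGULATORS", "I-ACIDITYREGULATORS", "B-ACIDS", "I-ACIDS",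
   "B-ADDITIVES", "I-ADDITIVES", "B-ALCOHOLS", "I-ALCOHOLS",
   "B-AMINOACIDS", "I-AMINOACIDS", "B-CARBOHYDRATES", "I-CARBOHYDRATES",
   "B-CAROTENOIDS", "I-CAROTENOIDS", "B-COLORANTS", "I-COLORANTS",
   "B-FIBER", "I-FIBER", "B-FLAVONOIDS", "I-FLAVONOIDS",
   "B-FLAVORINGS", "I-FLAVORINGS", "B-LIPIDS", "I-LIPIDS",
   "B-MACRONUTRIENTS", "I-MACRONUTRIENTS", "B-MINERALS", "I-MINERALS",
   "B-ORGANICCOMPOUNDS", "I-ORGANICCOMPOUNDS", "B-PHYTOCHEMICALS", "I-PHYTOCHEMICALS",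
   "B-PRESERVATIVES", "I-PRESERVATIVES", "B-PROTEINS", "I-PROTEINS",
   "B-PROXIMATES", "I-PROXIMATES", "B-STABILIZERS", "I-STABILIZERS",
   "B-STIMULANTS", "I-STIMULANTS", "B-SUGARS", "I-SUGARS",
   "B-VITAMINS", "I-VITAMINS", "B-WATER", "I-WATER"]

def pyWeightsLiteral : PySem.Dict String Int :=
  PySem.Dict.ofList (pyBaseLabels.map (fun k => (k, 0)))

-- 'for weight in weights: weights[weight] = 0'
def pyWeights0 : PySem.Dict String Int :=
  pyWeightsLiteral.keys.foldl (fun d k => d.insert k 0) pyWeightsLiteral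

-- 'if label_ not in weights: weights[label_] = 1 else: weights[label_] += 1'
def pyBump (d : PySem.Dict String Int) (l : String) : PySem.Dict String Int :=
  match d.get? l with
  | none => d.insert l 1
  | some v => d.insert l (v + 1)

def pyStepA (st : List (String × String) × List String × PySem.Dict String Int) (w0 : String) :
    List (String × String) × List String × PySem.Dict String Int :=
  let word := PySem.Str.strip w0
  let iob := st.1
  let ct := st.2.1
  let ws := st.2.2
  if PySem.Str.startswith word "</" && PySem.Str.endswith word ">" then
    (iob, [], ws)
  else if PySem.Str.startswith word "<" && PySem.Str.endswith word ">" then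
    (iob, ct ++ [PySem.Str.slice word (some 1) (some (-1))], ws)
  else
    match ct with
    | [] => (iob ++ [(word, "O")], ct, ws)
    | [t] =>
        let label := PySem.Str.upper ("B-" ++ t)
        (iob ++ [(word, label)], [t] ++ [t], pyBump ws label)
    | t :: u :: rest =>
        let label := PySem.Str.upper ("I-" ++ t)
        (iob ++ [(word, label)], t :: u :: rest, pyBump ws label)

def generate_iob_py (raw_string : String) : (Option (List (String × String))) × (Option (List (String × Int))) :=
  if PySem.Str.isIn "<>" raw_string then (none, none)
  else
    let r := (PySem.Str.split₀ raw_string).foldl pyStepA ([], [], pyWeights0)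
    (some r.1, some r.2.2.items)

-- ===== PORT B =====
-- pass 1: 'segments.append(cur)' at a closing tag, else 'cur.append(w.strip())'
def pySplitStep (st : List (List String) × List String) (w0 : String) :
    List (List String) × List String :=
  let w := PySem.Str.strip w0
  if PySem.Str.startswith w "</" && PySem.Str.endswith w ">" then (st.1 ++ [st.2], [])
  else (st.1, st.2 ++ [w])

-- pass 2 inner loop body (state: iob, opens, first, worded)
def pyInnerStep (st : List (String × String) × Int × String × Bool) (w : String) :
    List (String × String) × Int × String × Bool :=
  let iob := st.1
  let opens := st.2.1
  let first := st.2.2.1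
  let worded := st.2.2.2
  if PySem.Str.startswith w "<" && PySem.Str.endswith w ">" then
    (iob, opens + 1, (if opens == 0 then PySem.Str.slice w (some 1) (some (-1)) else first), worded)
  else if opens == 0 then (iob ++ [(w, "O")], opens, first, worded)
  else
    let pre := if opens == 1 && !worded then "B-" else "I-"
    (iob ++ [(w, PySem.Str.upper (pre ++ first))], opens, first, true)

-- pass 2 outer loop body: each segment restarts from 'opens, first, worded = 0, "", False'
def pySegFold (iob : List (String × String)) (seg : List String) : List (String × String) :=
  (seg.foldl pyInnerStep (iob, 0, "", false)).1

-- pass 3: 'if label != "O": weights[label] = weights.get(label, 0) + 1'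
def pyCountStep (d : PySem.Dict String Int) (p : String × String) : PySem.Dict String Int :=
  if p.2 ≠ "O" then d.insert p.2 (d.getD p.2 0 + 1) else d

def generate_iob_py_alt (raw_string : String) : (Option (List (String × String))) × (Option (List (String × Int))) :=
  if PySem.Str.isIn "<>" raw_string then (none, none)
  else
    let sp := (PySem.Str.split₀ raw_string).foldl pySplitStep ([], [])
    let iob := (sp.1 ++ [sp.2]).foldl pySegFold []
    let weights := iob.foldl pyCountStep (pyBaseLabels.foldl (fun d k => d.insert k 0) PySem.Dict.empty)
    (some iob, some weights.items)

-- ===== PRECONDITION & SPEC =====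
def Spec_generate_iob_py (raw_string : String) (out : (Option (List (String × String))) × (Option (List (String × Int)))) : Prop := out = generate_iob_py_alt raw_string
instance (raw_string : String) (out : (Option (List (String × String))) × (Option (List (String × Int)))) : Decidable (Spec_generate_iob_py raw_string out) := by unfold Spec_generate_iob_py; infer_instance

-- ===== CLAIM (what is proved, stated in full; the proofs are below) =====
def Claim_equal_generate_iob_py : Prop := ∀ (raw_string : String), Dom_generate_iob_py raw_string → Spec_generate_iob_py raw_string (generate_iob_py raw_string)

-- ===== LEMMAS AND PROOFS =====

-- proof-only: the fused single-pass version of B's stages 1+2 (closing tag = state reset)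
def pyCStep (st : List (String × String) × Int × String × Bool) (w0 : String) :
    List (String × String) × Int × String × Bool :=
  let w := PySem.Str.strip w0
  if PySem.Str.startswith w "</" && PySem.Str.endswith w ">" then (st.1, 0, "", false)
  else pyInnerStep st w

-- proof-only: B's stage-2 processing continued from an arbitrary mid-segment state
def pvProcFrom (st : List (String × String) × Int × String × Bool) :
    List (List String) → List (String × String)
  | [] => st.1
  | s :: rest => rest.foldl pySegFold (s.foldl pyInnerStep st).1

-- the invariant linking A's tag list to the fused scalar state
def pvInv (ct : List String) (opens : Int) (first : String) (worded : Bool) : Prop :=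
  0 ≤ opens ∧
  (opens = 0 → ct = [] ∧ worded = false) ∧
  (opens = 1 → (ct.length : Int) = if worded then 2 else 1) ∧
  (2 ≤ opens → 2 ≤ (ct.length : Int)) ∧
  (∀ t rest, ct = t :: rest → first = t)

-- the two zero-initialised vocabularies coincide
set_option maxRecDepth 100000 in
lemma base_eq :
    pyBaseLabels.foldl (fun d k => d.insert k 0) PySem.Dict.empty = pyWeights0 := by
  decide

-- generated labels are never "O"
lemma upper_ne_O (p t : String) (hp : p.toList.length = 2) : PySem.Str.upper (p ++ t) ≠ "O" := by
  intro h
  have h2 := congrArg (fun s => s.toList.length) h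
  simp only [PySem.Str.toList_upper, String.toList_append] at h2
  simp only [PySem.Chars.upper, List.length_map, List.length_append, hp,
    show ("O" : String).toList = ['O'] from rfl, List.length_cons, List.length_nil] at h2
  omega

-- A's in-loop bump equals B's counting step on a non-"O" label
lemma bump_eq_count (d : PySem.Dict String Int) (w l : String) (hl : l ≠ "O") :
    pyBump d l = pyCountStep d (w, l) := by
  unfold pyBump pyCountStep
  simp [hl, PySem.Dict.getD_eq_get?_getD]
  cases h : d.get? l <;> simp

-- both step functions only append to the iob accumulator
lemma stepA_shift (iob : List (String × String)) (ct : List String)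
    (w : PySem.Dict String Int) (v : String) :
    pyStepA (iob, ct, w) v = (iob ++ (pyStepA ([], ct, w) v).1, (pyStepA ([], ct, w) v).2) := by
  unfold pyStepA
  dsimp only
  split_ifs <;> cases ct with
  | nil => simp
  | cons t rest => cases rest <;> simp

lemma stepC_shift (iob : List (String × String)) (o : Int) (f : String) (wd : Bool) (v : String) :
    pyCStep (iob, o, f, wd) v = (iob ++ (pyCStep ([], o, f, wd) v).1, (pyCStep ([], o, f, wd) v).2) := by
  unfold pyCStep pyInnerStep
  dsimp only
  split_ifs <;> simp

lemma foldA_shift (words : List String) :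
    ∀ (iob : List (String × String)) (ct : List String) (w : PySem.Dict String Int),
    words.foldl pyStepA (iob, ct, w)
      = (iob ++ (words.foldl pyStepA ([], ct, w)).1, (words.foldl pyStepA ([], ct, w)).2) := by
  induction words with
  | nil => intro iob ct w; simp
  | cons v ws ih =>
    intro iob ct w
    simp only [List.foldl_cons]
    rw [stepA_shift]
    rcases h : pyStepA ([], ct, w) v with ⟨δ, ct1, w1⟩
    simp only
    rw [ih (iob ++ δ) ct1 w1, ih δ ct1 w1]
    simp

lemma foldC_shift (words : List String) :
    ∀ (iob : List (String × String)) (o : Int) (f : String) (wd : Bool),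
    words.foldl pyCStep (iob, o, f, wd)
      = (iob ++ (words.foldl pyCStep ([], o, f, wd)).1, (words.foldl pyCStep ([], o, f, wd)).2) := by
  induction words with
  | nil => intro iob o f wd; simp
  | cons v ws ih =>
    intro iob o f wd
    simp only [List.foldl_cons]
    rw [stepC_shift]
    rcases h : pyCStep ([], o, f, wd) v with ⟨δ, o1, f1, wd1⟩
    simp only
    rw [ih (iob ++ δ) o1 f1 wd1, ih δ o1 f1 wd1]
    simp

-- stage-1 fold: the segment accumulator only grows at the front
-- step-shape lemmas for the stage-1 fold and the fused step
lemma splitStep_close (st : List (List String) × List String) (v : String)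
    (h : (PySem.Str.startswith (PySem.Str.strip v) "</" && PySem.Str.endswith (PySem.Str.strip v) ">") = true) :
    pySplitStep st v = (st.1 ++ [st.2], []) := by
  simp only [pySplitStep]; rw [if_pos h]

lemma splitStep_word (st : List (List String) × List String) (v : String)
    (h : ¬ (PySem.Str.startswith (PySem.Str.strip v) "</" && PySem.Str.endswith (PySem.Str.strip v) ">") = true) :
    pySplitStep st v = (st.1, st.2 ++ [PySem.Str.strip v]) := by
  simp only [pySplitStep]; rw [if_neg h]

lemma cStep_close (st : List (String × String) × Int × String × Bool) (v : String)
    (h : (PySem.Str.startswith (PySem.Str.strip v) "</" && PySem.Str.endswith (PySem.Str.strip v) ">") = true) :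
    pyCStep st v = (st.1, 0, "", false) := by
  simp only [pyCStep]; rw [if_pos h]

lemma cStep_word (st : List (String × String) × Int × String × Bool) (v : String)
    (h : ¬ (PySem.Str.startswith (PySem.Str.strip v) "</" && PySem.Str.endswith (PySem.Str.strip v) ">") = true) :
    pyCStep st v = pyInnerStep st (PySem.Str.strip v) := by
  simp only [pyCStep]; rw [if_neg h]

lemma split_acc (ws : List String) :
    ∀ (segs : List (List String)) (cur : List String),
    ws.foldl pySplitStep (segs, cur)
      = (segs ++ (ws.foldl pySplitStep ([], cur)).1, (ws.foldl pySplitStep ([], cur)).2) := by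
  induction ws with
  | nil => intro segs cur; simp
  | cons v ws ih =>
    intro segs cur
    by_cases h : (PySem.Str.startswith (PySem.Str.strip v) "</" && PySem.Str.endswith (PySem.Str.strip v) ">") = true
    · rw [List.foldl_cons, List.foldl_cons,
          splitStep_close (segs, cur) v h,
          splitStep_close (([] : List (List String)), cur) v h]
      dsimp only
      simp only [List.nil_append]
      rw [ih (segs ++ [cur]) [], ih [cur] []]
      simp
    · rw [List.foldl_cons, List.foldl_cons,
          splitStep_word (segs, cur) v h,
          splitStep_word (([] : List (List String)), cur) v h]
      dsimp only
      exact ih segs (cur ++ [PySem.Str.strip v])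

-- stage-1 fold: a pending partial segment is a prefix of the first produced segment
lemma split_pre (ws : List String) :
    ∀ (cur : List String),
    ws.foldl pySplitStep ([], cur)
      = (match (ws.foldl pySplitStep ([], [])).1 with
         | [] => ([], cur ++ (ws.foldl pySplitStep ([], [])).2)
         | s :: S' => ((cur ++ s) :: S', (ws.foldl pySplitStep ([], [])).2)) := by
  induction ws with
  | nil => intro cur; simp
  | cons v ws ih =>
    intro cur
    by_cases h : (PySem.Str.startswith (PySem.Str.strip v) "</" && PySem.Str.endswith (PySem.Str.strip v) ">") = true
    · rw [List.foldl_cons, List.foldl_cons,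
          splitStep_close (([] : List (List String)), cur) v h,
          splitStep_close (([] : List (List String)), []) v h]
      dsimp only
      simp only [List.nil_append]
      rw [split_acc ws [cur] [], split_acc ws [[]] []]
      simp
    · rw [List.foldl_cons, List.foldl_cons,
          splitStep_word (([] : List (List String)), cur) v h,
          splitStep_word (([] : List (List String)), []) v h]
      dsimp only
      simp only [List.nil_append]
      rw [ih (cur ++ [PySem.Str.strip v]), ih [PySem.Str.strip v]]
      rcases (ws.foldl pySplitStep ([], [])).1 with _ | ⟨s, S'⟩ <;> simp

-- fusion: B's staged segmentation + labelling equals the fused single fold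
lemma fuse (words : List String) :
    ∀ (st : List (String × String) × Int × String × Bool),
    pvProcFrom st ((words.foldl pySplitStep ([], [])).1 ++ [(words.foldl pySplitStep ([], [])).2])
      = (words.foldl pyCStep st).1 := by
  induction words with
  | nil =>
    intro st
    simp [pvProcFrom]
  | cons v ws ih =>
    intro st
    by_cases h : (PySem.Str.startswith (PySem.Str.strip v) "</" && PySem.Str.endswith (PySem.Str.strip v) ">") = true
    · -- closing tag: new segment boundary / state reset
      rw [List.foldl_cons, List.foldl_cons,
          splitStep_close (([] : List (List String)), []) v h,
          cStep_close st v h]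
      dsimp only
      simp only [List.nil_append]
      rw [split_acc ws [[]] []]
      dsimp only
      have := ih (st.1, 0, "", false)
      rcases hS : (ws.foldl pySplitStep ([], [])).1 with _ | ⟨s, S'⟩
      · rw [hS] at this
        simpa [pvProcFrom, pySegFold] using this
      · rw [hS] at this
        simpa [pvProcFrom, pySegFold, List.foldl_cons] using this
    · -- ordinary word or opening tag: goes into the current segment
      rw [List.foldl_cons, List.foldl_cons,
          splitStep_word (([] : List (List String)), []) v h,
          cStep_word st v h]
      dsimp only
      simp only [List.nil_append]
      rw [split_pre ws [PySem.Str.strip v]]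
      have := ih (pyInnerStep st (PySem.Str.strip v))
      rcases hS : (ws.foldl pySplitStep ([], [])).1 with _ | ⟨s, S'⟩
      · rw [hS] at this
        simpa [pvProcFrom, List.foldl_append, List.foldl_cons] using this
      · rw [hS] at this
        simpa [pvProcFrom, List.foldl_append, List.foldl_cons] using this

-- one synchronized step: same appended tokens, invariant preserved, and A's weight update is
-- exactly the counting step folded over the appended tokens
set_option maxHeartbeats 2000000 in
lemma step_sync (ct : List String) (o : Int) (f : String) (wd : Bool)
    (w : PySem.Dict String Int) (v : String) (hinv : pvInv ct o f wd) :
    (pyStepA ([], ct, w) v).1 = (pyCStep ([], o, f, wd) v).1 ∧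
    pvInv (pyStepA ([], ct, w) v).2.1 (pyCStep ([], o, f, wd) v).2.1
      (pyCStep ([], o, f, wd) v).2.2.1 (pyCStep ([], o, f, wd) v).2.2.2 ∧
    (pyStepA ([], ct, w) v).2.2 = (pyCStep ([], o, f, wd) v).1.foldl pyCountStep w := by
  obtain ⟨h0, hz, h1, h2, hh⟩ := hinv
  unfold pyStepA pyCStep pyInnerStep pvInv
  dsimp only
  by_cases hc : (PySem.Str.startswith (PySem.Str.strip v) "</" && PySem.Str.endswith (PySem.Str.strip v) ">") = true
  · simp only [if_pos hc]
    refine ⟨by trivial, ⟨by omega, by simp, by omega, by omega, fun t rest h => by cases h⟩, by simp⟩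
  · simp only [if_neg hc]
    by_cases ho : (PySem.Str.startswith (PySem.Str.strip v) "<" && PySem.Str.endswith (PySem.Str.strip v) ">") = true
    · -- opening tag
      simp only [if_pos ho]
      refine ⟨by trivial, ⟨by omega, by omega, ?_, ?_, ?_⟩, by simp⟩
      · intro h
        have ho0 : o = 0 := by omega
        obtain ⟨hce, hwf⟩ := hz ho0
        subst hce hwf
        simp
      · intro h
        by_cases ho0 : o = 0
        · obtain ⟨hce, hwf⟩ := hz ho0
          subst hce hwf
          omega
        · have hlen : 1 ≤ (ct.length : Int) := by
            by_cases ho1 : o = 1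
            · have := h1 ho1; cases wd <;> simp_all
            · have := h2 (by omega); omega
          simp only [List.length_append, List.length_cons, List.length_nil]
          push_cast
          omega
      · intro t rest h
        cases ct with
        | nil =>
          have ho0 : o = 0 := by
            by_contra hne
            by_cases ho1 : o = 1
            · have := h1 ho1; cases wd <;> simp_all
            · have := h2 (by omega); simp_all
          simp only [ho0, beq_self_eq_true, if_true]
          simp only [List.nil_append, List.cons.injEq] at h
          exact h.1.symm ▸ rfl
        | cons a as =>
          have hne : o ≠ 0 := by
            intro ho0; exact absurd (hz ho0).1 (by simp)
          have : (o == 0) = false := by simp [hne]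
          simp only [this, Bool.false_eq_true, if_false]
          simp only [List.cons_append, List.cons.injEq] at h
          exact (hh a as rfl).trans h.1
    · -- ordinary word
      simp only [if_neg ho]
      cases ct with
      | nil =>
        have ho0 : o = 0 := by
          by_contra hne
          by_cases ho1 : o = 1
          · have := h1 ho1; cases wd <;> simp_all
          · have := h2 (by omega); simp_all
        obtain ⟨-, hwf⟩ := hz ho0
        simp only [ho0, beq_self_eq_true, if_true]
        refine ⟨by trivial, ⟨by omega, by simp [hwf], by intro h; omega, by omega, hh⟩, ?_⟩
        simp [pyCountStep]
      | cons t rest =>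
        have hne : o ≠ 0 := by
          intro ho0; exact absurd (hz ho0).1 (by simp)
        have hob : (o == 0) = false := by simp [hne]
        have hft : f = t := hh t rest rfl
        cases rest with
        | nil =>
          -- len ct = 1: B- case, opens = 1 and not worded
          have ho1 : o = 1 := by
            by_contra h'
            have := h2 (by omega)
            simp at this
          have hwf : wd = false := by
            have := h1 ho1; cases wd <;> simp_all
          have hb : (o == 1 && !wd) = true := by simp [ho1, hwf]
          simp only [hob, Bool.false_eq_true, if_false, hb, if_true, hft]
          refine ⟨by trivial, ⟨by omega, by omega, ?_, by omega, ?_⟩, ?_⟩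
          · intro _; simp
          · intro a b h
            simp only [List.singleton_append, List.cons.injEq] at h
            exact h.1
          · rw [bump_eq_count w (PySem.Str.strip v) _ (upper_ne_O "B-" t rfl)]
            simp [List.foldl]
        | cons u rest' =>
          -- len ct ≥ 2: I- case
          have hb : (o == 1 && !wd) = false := by
            by_cases ho1 : o = 1
            · have := h1 ho1
              have hwt : wd = true := by
                cases wd
                · simp at this; omega
                · rfl
              simp [hwt]
            · simp [ho1]
          simp only [hob, Bool.false_eq_true, if_false, hb, hft]
          refine ⟨by trivial, ⟨by omega, by omega, ?_, ?_, ?_⟩, ?_⟩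
          · intro ho1
            have := h1 ho1
            have hwt : wd = true := by
              cases wd
              · simp at this
                omega
              · rfl
            rw [hwt] at this
            exact this
          · intro _
            simp only [List.length_cons]
            push_cast
            omega
          · intro a b h
            simp only [List.cons.injEq] at h
            exact h.1
          · rw [bump_eq_count w (PySem.Str.strip v) _ (upper_ne_O "I-" t rfl)]
            simp [List.foldl]

-- main synchronisation: over any word list, A and the fused B build the same tokens and A's final
-- weights are B's counting pass over those tokens
lemma main_sync (words : List String) :
    ∀ (ct : List String) (o : Int) (f : String) (wd : Bool) (w : PySem.Dict String Int),
    pvInv ct o f wd →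
    (words.foldl pyStepA ([], ct, w)).1 = (words.foldl pyCStep ([], o, f, wd)).1 ∧
    (words.foldl pyStepA ([], ct, w)).2.2
      = (words.foldl pyCStep ([], o, f, wd)).1.foldl pyCountStep w := by
  induction words with
  | nil => intro ct o f wd w _; exact ⟨rfl, rfl⟩
  | cons v ws ih =>
    intro ct o f wd w hinv
    obtain ⟨hiob, hinv', hw⟩ := step_sync ct o f wd w v hinv
    simp only [List.foldl_cons]
    rcases hA : pyStepA ([], ct, w) v with ⟨δ, ct1, w1⟩
    rcases hB : pyCStep ([], o, f, wd) v with ⟨δ', o1, f1, wd1⟩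
    rw [hA, hB] at hiob hinv' hw
    simp only at hiob hinv' hw
    subst hiob
    rw [foldA_shift ws δ ct1 w1, foldC_shift ws δ o1 f1 wd1]
    obtain ⟨e1, e2⟩ := ih ct1 o1 f1 wd1 w1 hinv'
    constructor
    · simp [e1]
    · simp only [← hw, List.foldl_append, e2]

-- ===== VERDICT (by name: the statement is the Claim_ definition above) =====
theorem generate_iob_py_spec : Claim_equal_generate_iob_py := by
  intro raw _
  unfold Spec_generate_iob_py generate_iob_py generate_iob_py_alt
  by_cases hg : PySem.Str.isIn "<>" raw = true
  · rw [if_pos hg, if_pos hg]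
  · rw [if_neg hg, if_neg hg]
    have hf := fuse (PySem.Str.split₀ raw) ([], 0, "", false)
    obtain ⟨e1, e2⟩ := main_sync (PySem.Str.split₀ raw) [] 0 "" false pyWeights0
      ⟨by omega, fun _ => ⟨rfl, rfl⟩, by intro h; omega, by intro h; omega, fun t rest h => by cases h⟩
    rw [base_eq]
    simp only [← hf, e1, e2]
    have hpf : pvProcFrom (([] : List (String × String)), (0 : Int), "", false)
        (((PySem.Str.split₀ raw).foldl pySplitStep ([], [])).1
          ++ [((PySem.Str.split₀ raw).foldl pySplitStep ([], [])).2])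
        = ((((PySem.Str.split₀ raw).foldl pySplitStep ([], [])).1
          ++ [((PySem.Str.split₀ raw).foldl pySplitStep ([], [])).2]).foldl pySegFold []) := by
      rcases hS : ((PySem.Str.split₀ raw).foldl pySplitStep ([], [])).1 with _ | ⟨s, S'⟩
      · simp [pvProcFrom, pySegFold]
      · simp [pvProcFrom, pySegFold, List.foldl_cons]
    simp only [hpf]
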